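-- pv_equiv track=rewrite | github.com/alinaduca/Python | Tema2.py | rezolva_sistem
-- ===== SOURCE A (Python) =====
-- def rezolva_sistem(a, b, c, d, e):
--     for x in range(-10**3, 10**3):
--         for y in range(-10**3, 10**3):
--             for z in range(-10**3, 10**3):
--                 for w in range(-10**3, 10**3):
--                     if a * x + b * y + c * z + d * w == e:
--                         return x, y, z, w
--     return None
-- ===== SOURCE B (Python) =====
-- def rezolva_sistem(a, b, c, d, e):
--     R = range(-10**3, 10**3)
--     for x in R:
--         for y in R:
--             for z in R:
--                 r = e - a * x - b * y - c * z
--                 if d == 0: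
--                     if r == 0:
--                         return x, y, z, -10**3
--                 else:
--                     q, rem = divmod(r, d)
--                     if rem == 0 and -10**3 <= q < 10**3:
--                         return x, y, z, q
--     return None
-- ===== Notes on version B (the rewrite author's own statement) =====
-- stated objective: alternative
-- what changed: The innermost brute-force scan over w is replaced by solving d*w = e-ax-by-cz in closed form (divisibility + range check, with a separate d=0 case), removing one nesting level; intended as faster (O(n^3) vs O(n^4) loop iterations) but a timing run could not confirm it since neither finishes on the worst unsolvable inputs.
import Mathlib
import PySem

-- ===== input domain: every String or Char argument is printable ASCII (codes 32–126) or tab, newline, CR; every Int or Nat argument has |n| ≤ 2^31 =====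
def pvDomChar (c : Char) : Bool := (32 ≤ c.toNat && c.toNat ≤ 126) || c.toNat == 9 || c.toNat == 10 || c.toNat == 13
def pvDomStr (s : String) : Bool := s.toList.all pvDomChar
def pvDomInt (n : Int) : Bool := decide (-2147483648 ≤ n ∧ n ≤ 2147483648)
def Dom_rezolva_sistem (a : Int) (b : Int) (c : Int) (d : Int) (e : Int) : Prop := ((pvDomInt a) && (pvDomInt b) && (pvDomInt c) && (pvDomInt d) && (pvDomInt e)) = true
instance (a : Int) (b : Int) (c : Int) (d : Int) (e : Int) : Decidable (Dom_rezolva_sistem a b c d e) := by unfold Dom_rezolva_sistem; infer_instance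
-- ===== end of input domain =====

-- B replaces A's innermost brute-force scan over w by solving d*w = e-ax-by-cz in closed
-- form (divisibility and range check, separate d = 0 case), removing one nesting level (objective: alternative).

-- ===== PORT A =====
-- innermost loop: for w in range(-1000, 1000): if a*x+b*y+c*z+d*w == e: return (x,y,z,w)
def pvLoopW (a b c d e x y z : Int) : List Int → Option (List Int)
  | [] => none
  | w :: ws =>
    if a * x + b * y + c * z + d * w = e then some [x, y, z, w]
    else pvLoopW a b c d e x y z ws

def pvLoopZ (a b c d e x y : Int) : List Int → Option (List Int)
  | [] => none
  | z :: zs =>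
    match pvLoopW a b c d e x y z (PySem.List.pyRange (-1000) 1000 1) with
    | some r => some r
    | none => pvLoopZ a b c d e x y zs

def pvLoopY (a b c d e x : Int) : List Int → Option (List Int)
  | [] => none
  | y :: ys =>
    match pvLoopZ a b c d e x y (PySem.List.pyRange (-1000) 1000 1) with
    | some r => some r
    | none => pvLoopY a b c d e x ys

def pvLoopX (a b c d e : Int) : List Int → Option (List Int)
  | [] => none
  | x :: xs =>
    match pvLoopY a b c d e x (PySem.List.pyRange (-1000) 1000 1) with
    | some r => some r
    | none => pvLoopX a b c d e xs

def rezolva_sistem (a : Int) (b : Int) (c : Int) (d : Int) (e : Int) : Option (List Int) :=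
  pvLoopX a b c d e (PySem.List.pyRange (-1000) 1000 1)

-- ===== PORT B =====
-- closed-form inner step of Source B: solve d*w = r with w in range, no loop over w
def pvSolveW (a b c d e x y z : Int) : Option (List Int) :=
  let r := e - a * x - b * y - c * z
  if d = 0 then
    if r = 0 then some [x, y, z, -1000] else none
  else
    let q := PySem.Int.floordiv r d
    let rem := PySem.Int.mod r d
    if rem = 0 ∧ -1000 ≤ q ∧ q < 1000 then some [x, y, z, q] else none

def rezolva_sistem_alt (a : Int) (b : Int) (c : Int) (d : Int) (e : Int) : Option (List Int) :=
  (PySem.List.pyRange (-1000) 1000 1).findSome? fun x =>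
    (PySem.List.pyRange (-1000) 1000 1).findSome? fun y =>
      (PySem.List.pyRange (-1000) 1000 1).findSome? fun z =>
        pvSolveW a b c d e x y z

-- ===== PRECONDITION & SPEC =====
def Spec_rezolva_sistem (a : Int) (b : Int) (c : Int) (d : Int) (e : Int) (out : Option (List Int)) : Prop := out = rezolva_sistem_alt a b c d e
instance (a : Int) (b : Int) (c : Int) (d : Int) (e : Int) (out : Option (List Int)) : Decidable (Spec_rezolva_sistem a b c d e out) := by unfold Spec_rezolva_sistem; infer_instance

-- ===== CLAIM (what is proved, stated in full; the proofs are below) =====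
def Claim_equal_rezolva_sistem : Prop := ∀ (a : Int) (b : Int) (c : Int) (d : Int) (e : Int), Dom_rezolva_sistem a b c d e → Spec_rezolva_sistem a b c d e (rezolva_sistem a b c d e)

-- ===== LEMMAS AND PROOFS =====

-- if the condition fails for every element, the w-loop returns none
theorem pvLoopW_none (a b c d e x y z : Int) (l : List Int)
    (h : ∀ w ∈ l, a * x + b * y + c * z + d * w ≠ e) :
    pvLoopW a b c d e x y z l = none := by
  induction l with
  | nil => rfl
  | cons w ws ih =>
    simp only [pvLoopW]
    rw [if_neg (h w (List.mem_cons_self))]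
    exact ih fun w hw => h w (List.mem_cons_of_mem _ hw)

-- d = 0: the condition does not depend on w, so the loop returns the head iff it holds
theorem pvLoopW_zero (a b c e x y z : Int) (l : List Int) (hl : l ≠ []) :
    pvLoopW a b c 0 e x y z l =
      if a * x + b * y + c * z = e then some [x, y, z, l.headI] else none := by
  match l, hl with
  | w :: ws, _ =>
    simp only [pvLoopW, zero_mul, add_zero, List.headI]
    split_ifs with h
    · rfl
    · exact pvLoopW_none a b c 0 e x y z ws (by intro w' _; simpa using h)

-- d ≠ 0: the loop returns the unique candidate r / d iff it divides and is in the list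
theorem pvLoopW_nonzero (a b c d e x y z : Int) (hd : d ≠ 0) (l : List Int) :
    pvLoopW a b c d e x y z l =
      if d ∣ (e - a * x - b * y - c * z) ∧ (e - a * x - b * y - c * z) / d ∈ l
      then some [x, y, z, (e - a * x - b * y - c * z) / d] else none := by
  induction l with
  | nil => simp [pvLoopW]
  | cons w ws ih =>
    simp only [pvLoopW]
    by_cases h : a * x + b * y + c * z + d * w = e
    · have hdvd : d ∣ (e - a * x - b * y - c * z) := ⟨w, by linarith⟩
      have hq : (e - a * x - b * y - c * z) / d = w := by
        have : e - a * x - b * y - c * z = d * w := by linarith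
        rw [this, Int.mul_ediv_cancel_left _ hd]
      rw [if_pos h, if_pos ⟨hdvd, by rw [hq]; exact List.mem_cons_self⟩, hq]
    · rw [if_neg h, ih]
      by_cases hdvd : d ∣ (e - a * x - b * y - c * z)
      · have hqw : (e - a * x - b * y - c * z) / d ≠ w := by
          intro hq
          apply h
          obtain ⟨k, hk⟩ := hdvd
          have : k = w := by rw [hk, Int.mul_ediv_cancel_left _ hd] at hq; exact hq
          subst this; linarith
        simp [hdvd, hqw]
      · simp [hdvd]

-- the w-loop over the full range equals B's closed form
theorem pvLoopW_eq_solveW (a b c d e x y z : Int) :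
    pvLoopW a b c d e x y z (PySem.List.pyRange (-1000) 1000 1) = pvSolveW a b c d e x y z := by
  by_cases hd : d = 0
  · subst hd
    rw [pvLoopW_zero a b c e x y z _ (by rw [PySem.List.pyRange_one_cons (by norm_num)]; simp)]
    rw [PySem.List.pyRange_one_cons (by norm_num : (-1000:Int) < 1000)]
    simp only [pvSolveW, List.headI]
    split_ifs with h h'
    · rfl
    · exact absurd (by linarith : e - a * x - b * y - c * z = 0) h'
    · exact absurd (by linarith : a * x + b * y + c * z = e) h
    · rfl
  · rw [pvLoopW_nonzero a b c d e x y z hd]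
    simp only [pvSolveW, if_neg hd]
    have hmod : PySem.Int.mod (e - a * x - b * y - c * z) d = 0 ↔ d ∣ (e - a * x - b * y - c * z) :=
      PySem.Int.mod_eq_zero_iff_dvd _ _
    by_cases hdvd : d ∣ (e - a * x - b * y - c * z)
    · have hfd : PySem.Int.floordiv (e - a * x - b * y - c * z) d =
          (e - a * x - b * y - c * z) / d := by
        obtain ⟨k, hk⟩ := hdvd
        rw [hk, Int.mul_ediv_cancel_left _ hd]
        show Int.fdiv _ _ = _
        rw [Int.mul_fdiv_cancel_left _ hd]
      rw [hfd]
      simp only [PySem.List.mem_pyRange_one, hmod.mpr hdvd]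
      simp [hdvd]
    · rw [if_neg (by tauto), if_neg (by tauto)]

theorem pvLoopZ_eq (a b c d e x y : Int) (l : List Int) :
    pvLoopZ a b c d e x y l = l.findSome? fun z => pvSolveW a b c d e x y z := by
  induction l with
  | nil => rfl
  | cons z zs ih =>
    simp only [pvLoopZ, List.findSome?, pvLoopW_eq_solveW, ih]
    cases pvSolveW a b c d e x y z <;> rfl

theorem pvLoopY_eq (a b c d e x : Int) (l : List Int) :
    pvLoopY a b c d e x l = l.findSome? fun y =>
      (PySem.List.pyRange (-1000) 1000 1).findSome? fun z => pvSolveW a b c d e x y z := by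
  induction l with
  | nil => rfl
  | cons y ys ih =>
    simp only [pvLoopY, List.findSome?, pvLoopZ_eq, ih]
    cases (PySem.List.pyRange (-1000) 1000 1).findSome? fun z => pvSolveW a b c d e x y z <;> rfl

theorem pvLoopX_eq (a b c d e : Int) (l : List Int) :
    pvLoopX a b c d e l = l.findSome? fun x =>
      (PySem.List.pyRange (-1000) 1000 1).findSome? fun y =>
        (PySem.List.pyRange (-1000) 1000 1).findSome? fun z => pvSolveW a b c d e x y z := by
  induction l with
  | nil => rfl
  | cons x xs ih =>
    simp only [pvLoopX, List.findSome?, pvLoopY_eq, ih]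
    cases (PySem.List.pyRange (-1000) 1000 1).findSome? fun y =>
      (PySem.List.pyRange (-1000) 1000 1).findSome? fun z => pvSolveW a b c d e x y z <;> rfl

-- ===== VERDICT (by name: the statement is the Claim_ definition above) =====
theorem rezolva_sistem_spec : Claim_equal_rezolva_sistem := by
  intro a b c d e _
  show rezolva_sistem a b c d e = rezolva_sistem_alt a b c d e
  rw [rezolva_sistem, rezolva_sistem_alt, pvLoopX_eq]
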